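-- pv_equiv track=rewrite | github.com/ZechCodes/advent-of-code | 2021/day6/solution.py | run_generations
-- ===== SOURCE A (Python) =====
-- from collections import deque
--
-- def run_generations(days: list[int], generations: int):
--     babies = deque([0] * 2)
--     fish = deque(days)
--     for _ in range(generations):
--         baby_fish = babies.popleft()
--         parent_fish = fish.popleft()
--         babies.append(parent_fish)
--         fish.append(parent_fish + baby_fish)
--
--     return sum(fish) + sum(babies)
-- ===== SOURCE B (Python) =====
-- def run_generations(days: list[int], generations: int):
--     # Solve the linear recurrence f[i] = f[i-n] + f[i-n-2] directly on a DP
--     # array (two zero "baby" slots prepended), then sum the final window.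
--     if generations <= 0:
--         return sum(days)
--     n = len(days)
--     f = [0, 0] + list(days)          # f[j] holds term j-2; terms -2,-1 are 0
--     for _ in range(generations):
--         f.append(f[len(f) - n] + f[len(f) - n - 2])
--     return sum(f[generations:generations + n + 2])
-- ===== Notes on version B (the rewrite author's own statement) =====
-- stated objective: alternative
-- what changed: Replaces the two-deque step-by-step simulation with a direct solution of the underlying linear recurrence f[i] = f[i-n] + f[i-n-2] on one growing DP array, summing a final window of it.
import Mathlib
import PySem

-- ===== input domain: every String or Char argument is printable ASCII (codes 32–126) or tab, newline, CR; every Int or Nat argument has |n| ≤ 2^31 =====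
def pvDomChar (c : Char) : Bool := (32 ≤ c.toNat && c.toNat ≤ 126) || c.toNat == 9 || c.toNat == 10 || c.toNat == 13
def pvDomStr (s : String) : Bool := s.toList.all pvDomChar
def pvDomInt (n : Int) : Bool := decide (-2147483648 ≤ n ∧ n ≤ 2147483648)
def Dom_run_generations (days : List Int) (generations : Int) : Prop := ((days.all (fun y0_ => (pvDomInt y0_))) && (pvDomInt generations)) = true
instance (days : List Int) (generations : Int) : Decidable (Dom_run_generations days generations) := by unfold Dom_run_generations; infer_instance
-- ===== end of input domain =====

-- B replaces the two-deque simulation by solving the linear recurrence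
-- f[i] = f[i-n] + f[i-n-2] on a single DP array and summing a final window
-- (objective: alternative; same asymptotic cost).

-- ===== PORT A =====
-- one iteration of A's for-loop, recursing on the remaining generation count;
-- deques become lists (popleft = head/tail, append = ++ [x])
def runGenLoopA : Nat → List Int × List Int → List Int × List Int
  | 0, s => s
  | k + 1, s =>
      let baby := s.2.headD 0
      let parent := s.1.headD 0
      runGenLoopA k (s.1.tail ++ [parent + baby], s.2.tail ++ [parent])

def run_generations (days : List Int) (generations : Int) : Int :=
  let s := runGenLoopA generations.toNat (days, [0, 0])
  s.1.sum + s.2.sum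

-- ===== PORT B =====
-- B's loop: append f[len-n] + f[len-n-2] to the DP array, `generations` times
def bBuild (n : Nat) : Nat → List Int → List Int
  | 0, f => f
  | k + 1, f => bBuild n k (f ++ [f.getD (f.length - n) 0 + f.getD (f.length - n - 2) 0])

def run_generations_alt (days : List Int) (generations : Int) : Int :=
  if generations ≤ 0 then days.sum
  else
    let n := days.length
    let f := bBuild n generations.toNat ([0, 0] ++ days)
    (PySem.List.slice f (some generations) (some (generations + n + 2))).sum

-- ===== PRECONDITION & SPEC =====
-- A (and B) raise IndexError when days = [] and generations > 0; excluded.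
def Pre_run_generations (days : List Int) (generations : Int) : Prop :=
  days ≠ [] ∨ generations ≤ 0
instance (days : List Int) (generations : Int) : Decidable (Pre_run_generations days generations) := by unfold Pre_run_generations; infer_instance

def pvWitness_run_generations : List Int × Int := ([3, 4, 3, 1, 2], 18)

def Spec_run_generations (days : List Int) (generations : Int) (out : Int) : Prop := out = run_generations_alt days generations
instance (days : List Int) (generations : Int) (out : Int) : Decidable (Spec_run_generations days generations out) := by unfold Spec_run_generations; infer_instance

-- ===== CLAIM (what is proved, stated in full; the proofs are below) =====
def Claim_equal_run_generations : Prop := ∀ (days : List Int) (generations : Int), Dom_run_generations days generations → Pre_run_generations days generations → Spec_run_generations days generations (run_generations days generations)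

-- ===== LEMMAS AND PROOFS =====

-- The common mathematical object: the sequence of popped "parent" values.
-- Fseq days i = days[i] for i < n, and Fseq (i) = Fseq (i-n) + Fseq (i-n-2)
-- (the latter term 0 when i-n < 2), matching the fish/babies flow.
def Fseq (days : List Int) (i : Nat) : Int :=
  if _h : i < days.length then days.getD i 0
  else if _h2 : days.length = 0 then 0
  else Fseq days (i - days.length) +
        (if 2 ≤ i - days.length then Fseq days (i - days.length - 2) else 0)
termination_by i
decreasing_by all_goals omega

-- the baby slot that is popped at step j (0 for the two seed zeros)
def Bb (days : List Int) (j : Nat) : Int := if 2 ≤ j then Fseq days (j - 2) else 0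

lemma F_rec (days : List Int) (h : days.length ≠ 0) (m : Nat) :
    Fseq days (m + days.length) = Fseq days m + Bb days m := by
  rw [Fseq, dif_neg (by omega), dif_neg h]
  simp [Bb]

lemma map_F_range' (days : List Int) :
    (List.range' 0 days.length).map (Fseq days) = days := by
  apply List.ext_getElem
  · simp
  · intro i h1 h2
    simp only [List.getElem_map, List.getElem_range', Nat.zero_add, Nat.one_mul]
    rw [Fseq, dif_pos h2, List.getD_eq_getElem _ _ h2]

lemma loopA_inv (days : List Int) (h : days.length ≠ 0) (k m : Nat) :
    runGenLoopA k ((List.range' m days.length).map (Fseq days), [Bb days m, Bb days (m + 1)])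
    = ((List.range' (m + k) days.length).map (Fseq days),
        [Bb days (m + k), Bb days (m + k + 1)]) := by
  induction k generalizing m with
  | zero => rfl
  | succ k ih =>
    obtain ⟨n, hn⟩ : ∃ n, days.length = n + 1 := ⟨days.length - 1, by omega⟩
    rw [runGenLoopA]
    have h1 : List.range' m days.length = m :: List.range' (m + 1) n := by
      rw [hn, List.range'_succ]
    have h2 : (List.range' (m + 1) days.length).map (Fseq days)
        = (List.range' (m + 1) n).map (Fseq days) ++ [Fseq days (m + days.length)] := by
      rw [hn, List.range'_concat]
      simp [Nat.add_comm, Nat.add_left_comm]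
    simp only [h1, List.map_cons, List.headD_cons, List.tail_cons, List.cons_append,
      List.nil_append]
    rw [show Fseq days m + Bb days m = Fseq days (m + days.length) from (F_rec days h m).symm,
        ← h2]
    have hb : Fseq days m = Bb days (m + 2) := by simp [Bb]
    rw [hb]
    have e := ih (m + 1)
    rw [show m + 1 + 1 = m + 2 from by omega] at e
    rw [e, show m + 1 + k = m + (k + 1) from by omega]

lemma bBuild_inv (days : List Int) (h : days.length ≠ 0) (k m : Nat) :
    bBuild days.length k ([0, 0] ++ (List.range' 0 (days.length + m)).map (Fseq days))
    = [0, 0] ++ (List.range' 0 (days.length + m + k)).map (Fseq days) := by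
  induction k generalizing m with
  | zero => rfl
  | succ k ih =>
    rw [bBuild]
    have hlen : ([(0:Int), 0] ++ (List.range' 0 (days.length + m)).map (Fseq days)).length
        = days.length + m + 2 := by simp
    have hget1 : ([(0:Int), 0] ++ (List.range' 0 (days.length + m)).map (Fseq days)).getD
        (([(0:Int), 0] ++ (List.range' 0 (days.length + m)).map (Fseq days)).length - days.length) 0
        = Fseq days m := by
      rw [hlen]
      have : days.length + m + 2 - days.length = m + 2 := by omega
      rw [this]
      show ((0:Int) :: 0 :: (List.range' 0 (days.length + m)).map (Fseq days)).getD (m + 2) 0 = _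
      rw [List.getD_cons_succ, List.getD_cons_succ,
          List.getD_eq_getElem _ _ (by simp; omega)]
      simp [List.getElem_range']
    have hget2 : ([(0:Int), 0] ++ (List.range' 0 (days.length + m)).map (Fseq days)).getD
        (([(0:Int), 0] ++ (List.range' 0 (days.length + m)).map (Fseq days)).length - days.length - 2) 0
        = Bb days m := by
      rw [hlen]
      have : days.length + m + 2 - days.length - 2 = m := by omega
      rw [this]
      match m with
      | 0 => simp [Bb]
      | 1 =>
        show ((0:Int) :: 0 :: _).getD 1 0 = _
        simp [Bb]
      | Nat.succ (Nat.succ m') =>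
        show ((0:Int) :: 0 :: (List.range' 0 (days.length + (m' + 2))).map (Fseq days)).getD (m' + 2) 0 = _
        rw [List.getD_cons_succ, List.getD_cons_succ,
            List.getD_eq_getElem _ _ (by simp; omega)]
        simp [List.getElem_range', Bb]
    rw [hget1, hget2,
        show Fseq days m + Bb days m = Fseq days (m + days.length) from (F_rec days h m).symm]
    have hcat : ([(0:Int), 0] ++ (List.range' 0 (days.length + m)).map (Fseq days))
          ++ [Fseq days (m + days.length)]
        = [0, 0] ++ (List.range' 0 (days.length + (m + 1))).map (Fseq days) := by
      rw [show days.length + (m + 1) = (days.length + m) + 1 from by omega, List.range'_concat]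
      simp [Nat.add_comm]
    rw [hcat, ih (m + 1)]
    rw [show days.length + (m + 1) + k = days.length + m + (k + 1) from by omega]

lemma drop_sum (days : List Int) (h : days.length ≠ 0) (g : Nat) (hg : 1 ≤ g) :
    (([(0:Int), 0] ++ (List.range' 0 (days.length + g)).map (Fseq days)).drop g).sum
    = ((List.range' g days.length).map (Fseq days)).sum + Bb days g + Bb days (g + 1) := by
  match g, hg with
  | 1, _ =>
    show ((0:Int) :: (List.range' 0 (days.length + 1)).map (Fseq days)).sum = _
    rw [show days.length + 1 = 1 + days.length from by omega,
        ← @List.range'_append 0 1 days.length 1]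
    simp [Bb, List.range'_one]
    ring
  | (t + 2), _ =>
    show (((0:Int) :: 0 :: (List.range' 0 (days.length + (t + 2))).map (Fseq days)).drop (t + 2)).sum = _
    rw [List.drop_succ_cons, List.drop_succ_cons,
        show days.length + (t + 2) = t + (days.length + 2) from by omega,
        ← @List.range'_append 0 t (days.length + 2) 1,
        List.map_append, List.drop_left' (by simp)]
    rw [show 0 + 1 * t = t from by omega,
        show days.length + 2 = days.length + 1 + 1 from by omega,
        List.range'_succ, List.range'_succ]
    simp [Bb]
    ring

-- ===== VERDICT (by name: the statement is the Claim_ definition above) =====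
theorem run_generations_spec : Claim_equal_run_generations := by
  intro days generations _ hpre
  unfold Spec_run_generations run_generations run_generations_alt
  by_cases hg : generations ≤ 0
  · rw [if_pos hg, Int.toNat_of_nonpos hg]
    simp [runGenLoopA]
  · rw [if_neg hg]
    show (runGenLoopA generations.toNat (days, [0, 0])).1.sum
          + (runGenLoopA generations.toNat (days, [0, 0])).2.sum
        = (PySem.List.slice (bBuild days.length generations.toNat ([0, 0] ++ days))
            (some generations) (some (generations + (days.length : Int) + 2))).sum
    have hne : days.length ≠ 0 := by
      rcases hpre with h | h2
      · simpa using h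
      · omega
    set gn := generations.toNat with hgn
    have hcast : (gn : Int) = generations := Int.toNat_of_nonneg (by omega)
    have hgn1 : 1 ≤ gn := by omega
    -- A side
    have hA : runGenLoopA gn (days, [0, 0])
        = ((List.range' gn days.length).map (Fseq days), [Bb days gn, Bb days (gn + 1)]) := by
      have h0 : ([(0:Int), 0] : List Int) = [Bb days 0, Bb days 1] := by simp [Bb]
      conv_lhs => rw [← map_F_range' days, h0]
      rw [loopA_inv days hne gn 0]
      simp
    -- B side
    have hB : bBuild days.length gn ([0, 0] ++ days)
        = [0, 0] ++ (List.range' 0 (days.length + gn)).map (Fseq days) := by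
      conv_lhs => rw [← map_F_range' days]
      have := bBuild_inv days hne gn 0
      simpa using this
    rw [hA, hB]
    have hslice : PySem.List.slice
        ([(0:Int), 0] ++ (List.range' 0 (days.length + gn)).map (Fseq days))
        (some generations) (some (generations + (days.length : Int) + 2))
      = ([(0:Int), 0] ++ (List.range' 0 (days.length + gn)).map (Fseq days)).drop gn := by
      rw [← hcast,
          show ((gn : Int) + (days.length : Int) + 2) = ((gn + days.length + 2 : Nat) : Int) from by
            push_cast; ring,
          PySem.List.slice_natCast,
          List.take_of_length_le (by simp; omega)]
    rw [hslice, drop_sum days hne gn hgn1]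
    simp
    ring
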